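-- pv_equiv track=rewrite | github.com/phpet/aoc | 2024/day07/day07.py | generate_op_combinations
-- ===== SOURCE A (Python) =====
-- def generate_op_combinations(n, part):
--     if part == 1:
--         operators = "+*"
--     else:
--         operators = "+*|"
--
--     if n == 0:
--         return [""]
--
--     # run recursively
--     smaller_combinations = generate_op_combinations(n - 1, part)
--
--     # generate all combinations
--     combinations = []
--     for op in operators:
--         for comb in smaller_combinations:
--             combinations.append(op + comb)
--
--     return combinations
-- ===== SOURCE B (Python) =====
-- def generate_op_combinations(n, part):
--     operators = "+*" if part == 1 else "+*|"
--     result = [""]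
--     for _ in range(n):
--         result = [s + op for s in result for op in operators]
--     return result
-- ===== Notes on version B (the rewrite author's own statement) =====
-- stated objective: simpler
-- what changed: Replaces the n-deep recursion (prepend with outer operator loop) by a single iterative cartesian-product loop that extends each string on the right n times.
import Mathlib
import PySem

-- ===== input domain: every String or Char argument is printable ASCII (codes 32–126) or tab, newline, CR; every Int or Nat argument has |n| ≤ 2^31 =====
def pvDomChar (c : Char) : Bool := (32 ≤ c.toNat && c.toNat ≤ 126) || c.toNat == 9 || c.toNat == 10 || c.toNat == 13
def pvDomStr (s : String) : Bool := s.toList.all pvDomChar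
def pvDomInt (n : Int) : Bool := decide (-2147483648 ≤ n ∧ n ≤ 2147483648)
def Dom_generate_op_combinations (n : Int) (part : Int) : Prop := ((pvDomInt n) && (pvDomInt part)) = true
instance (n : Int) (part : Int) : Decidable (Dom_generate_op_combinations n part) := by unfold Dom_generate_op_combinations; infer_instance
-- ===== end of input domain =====

-- B replaces A's n-deep recursion by a single iterative cartesian-product loop (objective: simpler).
-- Pre_ excludes n < 0, where the Python A recurses without reaching a base case and raises RecursionError.


-- ===== PORT A =====
-- A's recursion, on the Nat image of n (Pre_ restricts to n ≥ 0, where this is exact):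
-- base case n == 0 returns [""], step prepends each operator to every smaller combination
-- via the two nested accumulating loops.
def goA (operators : String) : Nat → List String
  | 0 => [""]
  | k+1 =>
    let smaller := goA operators k
    operators.toList.foldl
      (fun combinations op =>
        smaller.foldl (fun cs comb => cs ++ [String.singleton op ++ comb]) combinations)
      []

def generate_op_combinations (n : Int) (part : Int) : List String :=
  let operators := if part = 1 then "+*" else "+*|"
  goA operators n.toNat

-- ===== PORT B =====
-- Source B: result = [""]; for _ in range(n): result = [s + op for s in result for op in operators]
def generate_op_combinations_alt (n : Int) (part : Int) : List String :=
  let operators := if part = 1 then "+*" else "+*|"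
  (List.range n.toNat).foldl
    (fun result _ => result.flatMap (fun s => operators.toList.map (fun op => s ++ String.singleton op)))
    [""]

-- ===== PRECONDITION & SPEC =====
-- Pre_ excludes n < 0: there the Python A recurses forever (RecursionError), returning nothing.
def Pre_generate_op_combinations (n : Int) (part : Int) : Prop := 0 ≤ n
instance (n : Int) (part : Int) : Decidable (Pre_generate_op_combinations n part) := by unfold Pre_generate_op_combinations; infer_instance
def pvWitness_generate_op_combinations : Int × Int := (2, 1)

def Spec_generate_op_combinations (n : Int) (part : Int) (out : List String) : Prop := out = generate_op_combinations_alt n part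
instance (n : Int) (part : Int) (out : List String) : Decidable (Spec_generate_op_combinations n part out) := by unfold Spec_generate_op_combinations; infer_instance

-- ===== CLAIM (what is proved, stated in full; the proofs are below) =====
def Claim_equal_generate_op_combinations : Prop := ∀ (n : Int) (part : Int), Dom_generate_op_combinations n part → Pre_generate_op_combinations n part → Spec_generate_op_combinations n part (generate_op_combinations n part)

-- ===== LEMMAS AND PROOFS =====

-- the inner accumulating loop is append-of-map
theorem foldl_snoc_map (l : List String) (f : String → String) (init : List String) :
    l.foldl (fun cs c => cs ++ [f c]) init = init ++ l.map f := by
  induction l generalizing init with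
  | nil => simp
  | cons x xs ih => simp [List.foldl, ih]

-- the outer accumulating loop is append-of-flatMap
theorem foldl_acc_flatMap (l : List Char) (g : Char → List String) (init : List String) :
    l.foldl (fun acc op => acc ++ g op) init = init ++ l.flatMap g := by
  induction l generalizing init with
  | nil => simp
  | cons x xs ih => simp [List.foldl, ih]

-- A's step, as a flatMap (operators outermost, prepend)
theorem goA_succ (ops : String) (k : Nat) :
    goA ops (k+1) = ops.toList.flatMap (fun op => (goA ops k).map (fun c => String.singleton op ++ c)) := by
  show ops.toList.foldl _ [] = _
  rw [show (fun (combinations : List String) (op : Char) =>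
        (goA ops k).foldl (fun cs comb => cs ++ [String.singleton op ++ comb]) combinations)
      = fun combinations op => combinations ++ (goA ops k).map (fun c => String.singleton op ++ c) from
      funext fun _ => funext fun op => foldl_snoc_map _ _ _]
  rw [foldl_acc_flatMap]
  simp

theorem string_push_append (s t : String) (c : Char) : (s ++ t).push c = s ++ t.push c := by
  apply String.ext; simp

-- A's result can also be built by extending on the right (B's step)
theorem goA_snoc (ops : String) (k : Nat) :
    goA ops (k+1) = (goA ops k).flatMap (fun s => ops.toList.map (fun op => s ++ String.singleton op)) := by
  induction k with
  | zero => rw [goA_succ]; simp [goA, String.singleton, ← List.map_eq_flatMap]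
  | succ k ih =>
    rw [goA_succ ops (k+1)]
    conv_lhs => rw [ih]
    conv_rhs => rw [goA_succ ops k]
    simp [List.map_flatMap, List.flatMap_map, List.flatMap_assoc, List.map_map,
      Function.comp_def, string_push_append]

-- B's fold computes A's recursion
theorem alt_eq_goA (ops : String) (m : Nat) :
    (List.range m).foldl
      (fun result _ => result.flatMap (fun s => ops.toList.map (fun op => s ++ String.singleton op)))
      [""] = goA ops m := by
  induction m with
  | zero => simp [goA]
  | succ m ih => rw [List.range_succ, List.foldl_append, ih, goA_snoc]; rfl

-- ===== VERDICT (by name: the statement is the Claim_ definition above) =====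
theorem generate_op_combinations_spec : Claim_equal_generate_op_combinations := by
  intro n part _ _
  unfold Spec_generate_op_combinations generate_op_combinations generate_op_combinations_alt
  rw [alt_eq_goA]
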